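-- pv_equiv track=rewrite | github.com/mwenge/tempest | notebooks/well_graphs.py | getCentre
-- ===== SOURCE A (Python) =====
-- def getCentre(vertices):
--     x_max = max([x for x,_ in vertices])
--     x_min = min([x for x,_ in vertices])
--     y_max = max([y for _,y in vertices])
--     y_min = min([y for _,y in vertices])
--     x_mid = int((x_max + x_min)/2)
--     y_mid = int((y_max + y_min)/2)
--     return (x_mid,y_mid)
-- ===== SOURCE B (Python) =====
-- def getCentre(vertices):
--     x0, y0 = vertices[0]
--     x_min = x_max = x0
--     y_min = y_max = y0
--     for x, y in vertices[1:]: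
--         if x < x_min: x_min = x
--         if x > x_max: x_max = x
--         if y < y_min: y_min = y
--         if y > y_max: y_max = y
--     return (int((x_max + x_min) / 2), int((y_max + y_min) / 2))
-- ===== Notes on version B (the rewrite author's own statement) =====
-- stated objective: simpler
-- what changed: Replaces four separate list-comprehension passes through max()/min() with a single loop over the vertices maintaining all four running extremes.
import Mathlib
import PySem

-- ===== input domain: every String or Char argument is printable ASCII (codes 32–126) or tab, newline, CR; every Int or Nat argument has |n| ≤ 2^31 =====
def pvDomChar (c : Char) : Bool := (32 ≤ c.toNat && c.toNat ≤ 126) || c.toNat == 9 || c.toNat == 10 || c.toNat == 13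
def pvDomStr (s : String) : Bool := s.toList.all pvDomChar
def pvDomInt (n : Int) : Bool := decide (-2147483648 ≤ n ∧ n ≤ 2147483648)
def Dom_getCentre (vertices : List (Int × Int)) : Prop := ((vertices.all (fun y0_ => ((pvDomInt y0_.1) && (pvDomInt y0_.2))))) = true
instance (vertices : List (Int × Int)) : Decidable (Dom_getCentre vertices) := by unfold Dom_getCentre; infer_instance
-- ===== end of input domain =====

-- B replaces A's four comprehension passes through max()/min() with one loop keeping four
-- running extremes (objective: simpler, single pass). Equivalence is on the return value.
-- int((a+b)/2): |coords| ≤ 2^31 on Dom, so the float division is exact and int() truncates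
-- toward zero, which is Int.tdiv.

-- ===== PORT A =====
def getCentre (vertices : List (Int × Int)) : Int × Int :=
  -- max([...]) / min([...]) over the four comprehensions; none only on the empty list (ValueError), excluded by Pre_
  let x_max := (PySem.List.max? (vertices.map Prod.fst) (fun v => v)).getD 0
  let x_min := (PySem.List.min? (vertices.map Prod.fst) (fun v => v)).getD 0
  let y_max := (PySem.List.max? (vertices.map Prod.snd) (fun v => v)).getD 0
  let y_min := (PySem.List.min? (vertices.map Prod.snd) (fun v => v)).getD 0
  let x_mid := Int.tdiv (x_max + x_min) 2   -- int((…)/2): exact float division then truncation toward zero = Int.tdiv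
  let y_mid := Int.tdiv (y_max + y_min) 2
  (x_mid, y_mid)

-- ===== PORT B =====
def getCentre_alt (vertices : List (Int × Int)) : Int × Int :=
  match vertices with
  | [] => (0, 0)  -- vertices[0] raises IndexError in B; excluded by Pre_
  | (x0, y0) :: rest =>
    let s : Int × Int × Int × Int :=
      rest.foldl (fun st v =>
        (if v.1 < st.1 then v.1 else st.1,
         if v.1 > st.2.1 then v.1 else st.2.1,
         if v.2 < st.2.2.1 then v.2 else st.2.2.1,
         if v.2 > st.2.2.2 then v.2 else st.2.2.2))
        (x0, x0, y0, y0)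
    (Int.tdiv (s.2.1 + s.1) 2, Int.tdiv (s.2.2.2 + s.2.2.1) 2)

-- ===== PRECONDITION & SPEC =====
-- A raises ValueError (max of empty sequence) on the empty list; excluded.
def Pre_getCentre (vertices : List (Int × Int)) : Prop := vertices ≠ []
instance (vertices : List (Int × Int)) : Decidable (Pre_getCentre vertices) := by unfold Pre_getCentre; infer_instance
def pvWitness_getCentre : (List (Int × Int)) := [(1, 2), (-3, 4)]

def Spec_getCentre (vertices : List (Int × Int)) (out : Int × Int) : Prop := out = getCentre_alt vertices
instance (vertices : List (Int × Int)) (out : Int × Int) : Decidable (Spec_getCentre vertices out) := by unfold Spec_getCentre; infer_instance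

-- ===== CLAIM (what is proved, stated in full; the proofs are below) =====
def Claim_equal_getCentre : Prop := ∀ (vertices : List (Int × Int)), Dom_getCentre vertices → Pre_getCentre vertices → Spec_getCentre vertices (getCentre vertices)

-- ===== LEMMAS AND PROOFS =====

-- B's four-extremes fold, split into the four independent min/max folds.
theorem fold4_split (rest : List (Int × Int)) (a b c d : Int) :
    rest.foldl (fun (st : Int × Int × Int × Int) v =>
        (if v.1 < st.1 then v.1 else st.1,
         if v.1 > st.2.1 then v.1 else st.2.1,
         if v.2 < st.2.2.1 then v.2 else st.2.2.1,
         if v.2 > st.2.2.2 then v.2 else st.2.2.2)) (a, b, c, d)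
    = ((rest.map Prod.fst).foldl min a, (rest.map Prod.fst).foldl max b,
       (rest.map Prod.snd).foldl min c, (rest.map Prod.snd).foldl max d) := by
  induction rest generalizing a b c d with
  | nil => rfl
  | cons v t ih =>
    have hmin : ∀ p q : Int, (if q < p then q else p) = min p q := by
      intro p q; rw [min_def]; split_ifs <;> omega
    have hmax : ∀ p q : Int, (if q > p then q else p) = max p q := by
      intro p q; rw [max_def]; split_ifs <;> omega
    rw [List.foldl_cons, ih]
    simp only [List.map_cons, List.foldl_cons, hmin, hmax]

-- ===== VERDICT (by name: the statement is the Claim_ definition above) =====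
theorem getCentre_spec : Claim_equal_getCentre := by
  intro vertices _ hpre
  match vertices with
  | [] => exact absurd rfl hpre
  | (x0, y0) :: rest =>
    show getCentre _ = getCentre_alt _
    simp only [getCentre, getCentre_alt, fold4_split, List.map_cons,
      PySem.List.max?_id_cons, PySem.List.min?_id_cons, Option.getD_some]
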